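-- pv_equiv track=rewrite | github.com/Hurri08/Pr0poll | utils/playerData.py | _getAllAllianzMember
-- ===== SOURCE A (Python) =====
-- def _getAllAllianzMember(userdata: dict):
--     fullAllianzData = {}
--     for user in userdata:
--         name: str = userdata[user]["allianz"].lower().strip()
--         if name in fullAllianzData:
--             fullAllianzData[name].append(userdata[user])
--         else:
--             fullAllianzData[name] = [userdata[user]]
--
--     return fullAllianzData
-- ===== SOURCE B (Python) =====
-- def _getAllAllianzMember(userdata: dict):
--     pairs = [(v["allianz"].lower().strip(), v) for v in userdata.values()]
--     names = list(dict.fromkeys(name for name, _ in pairs))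
--     return {n: [v for m, v in pairs if m == n] for n in names}
-- ===== Notes on version B (the rewrite author's own statement) =====
-- stated objective: alternative
-- what changed: replaces A's single incremental dict-building pass (per-user membership test with append-or-insert) by a three-stage pipeline: extract normalized (name, value) pairs, dedup the names in first-occurrence order, then build each group with one filter over the pair list
import Mathlib
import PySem

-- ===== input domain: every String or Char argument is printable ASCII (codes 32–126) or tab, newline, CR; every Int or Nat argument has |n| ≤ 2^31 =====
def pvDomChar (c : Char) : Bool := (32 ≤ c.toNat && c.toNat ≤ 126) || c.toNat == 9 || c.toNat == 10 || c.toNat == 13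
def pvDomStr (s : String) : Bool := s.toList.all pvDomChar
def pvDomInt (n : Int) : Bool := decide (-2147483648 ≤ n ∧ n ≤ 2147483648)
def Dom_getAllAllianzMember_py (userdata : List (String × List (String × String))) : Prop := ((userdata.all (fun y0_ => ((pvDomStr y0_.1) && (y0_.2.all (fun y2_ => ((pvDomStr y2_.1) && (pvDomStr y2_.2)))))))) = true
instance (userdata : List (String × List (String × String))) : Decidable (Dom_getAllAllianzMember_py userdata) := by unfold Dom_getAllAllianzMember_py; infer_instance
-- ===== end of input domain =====

-- B groups the users by a pipeline (pairs, dedup'd names, one filter per name) instead of A's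
-- incremental dict-building pass; same return value (objective: alternative, not faster).

-- shared normalization both Pythons compute: userdata[user]["allianz"].lower().strip()
def pvName (v : List (String × String)) : String :=
  PySem.Str.strip (PySem.Str.lower ((PySem.Dict.mk v).getD "allianz" ""))

-- ===== PORT A =====
def getAllAllianzMember_py (userdata : List (String × List (String × String))) : List (String × List (List (String × String))) :=
  (userdata.foldl
    (fun (d : PySem.Dict String (List (List (String × String)))) p =>
      let name := pvName p.2
      if d.contains name then
        d.insert name (d.getD name [] ++ [p.2])     -- fullAllianzData[name].append(userdata[user])
      else
        d.insert name [p.2])                        -- fullAllianzData[name] = [userdata[user]]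
    PySem.Dict.empty).items

-- ===== PORT B =====
def getAllAllianzMember_py_alt (userdata : List (String × List (String × String))) : List (String × List (List (String × String))) :=
  let pairs := userdata.map (fun p => (pvName p.2, p.2))
  let names := PySem.List.dedup (pairs.map Prod.fst)
  names.map (fun n => (n, (pairs.filter (fun q => q.1 == n)).map (fun q => q.2)))

-- ===== PRECONDITION & SPEC =====
-- Pre_ excludes exactly the inputs where Python A raises KeyError: a user dict without key "allianz".
def Pre_getAllAllianzMember_py (userdata : List (String × List (String × String))) : Prop :=
  ∀ p ∈ userdata, (PySem.Dict.mk p.2).contains "allianz" = true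
instance (userdata : List (String × List (String × String))) : Decidable (Pre_getAllAllianzMember_py userdata) := by unfold Pre_getAllAllianzMember_py; infer_instance
def pvWitness_getAllAllianzMember_py : (List (String × List (String × String))) :=
  [("u1", [("allianz", " Foo ")]), ("u2", [("allianz", "foo")]), ("u3", [("allianz", "Bar")])]

def Spec_getAllAllianzMember_py (userdata : List (String × List (String × String))) (out : List (String × List (List (String × String)))) : Prop := out = getAllAllianzMember_py_alt userdata
instance (userdata : List (String × List (String × String))) (out : List (String × List (List (String × String)))) : Decidable (Spec_getAllAllianzMember_py userdata out) := by unfold Spec_getAllAllianzMember_py; infer_instance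

-- ===== CLAIM (what is proved, stated in full; the proofs are below) =====
def Claim_equal_getAllAllianzMember_py : Prop := ∀ (userdata : List (String × List (String × String))), Dom_getAllAllianzMember_py userdata → Pre_getAllAllianzMember_py userdata → Spec_getAllAllianzMember_py userdata (getAllAllianzMember_py userdata)

-- ===== LEMMAS AND PROOFS =====

-- A's if/append/else/insert step is exactly Dict.modify with default [].
theorem pv_step_eq (d : PySem.Dict String (List (List (String × String)))) (p : String × List (String × String)) :
    (let name := pvName p.2
     if d.contains name then d.insert name (d.getD name [] ++ [p.2]) else d.insert name [p.2])
    = d.modify (pvName p.2) [] (fun l => l ++ [p.2]) := by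
  by_cases h : d.contains (pvName p.2) = true
  · simp [h, PySem.Dict.modify]
  · simp [h, PySem.Dict.modify,
      PySem.Dict.getD_of_not_contains d ([] : List (List (String × String))) (by simpa using h)]

theorem pv_main (userdata : List (String × List (String × String))) :
    getAllAllianzMember_py userdata = getAllAllianzMember_py_alt userdata := by
  unfold getAllAllianzMember_py getAllAllianzMember_py_alt
  have hstep : (fun (d : PySem.Dict String (List (List (String × String)))) (p : String × List (String × String)) =>
      let name := pvName p.2
      if d.contains name then d.insert name (d.getD name [] ++ [p.2]) else d.insert name [p.2])
      = fun (d : PySem.Dict String (List (List (String × String)))) (p : String × List (String × String)) =>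
          d.modify (pvName p.2) [] (fun l => l ++ [p.2]) :=
    funext fun d => funext fun p => pv_step_eq d p
  rw [hstep]
  have hmap : userdata.foldl (fun d p => d.modify (pvName p.2) [] (fun l => l ++ [p.2])) PySem.Dict.empty
      = (userdata.map (fun p => (pvName p.2, p.2))).foldl
          (fun d q => d.modify q.1 [] (fun l => l ++ [q.2])) PySem.Dict.empty := by
    rw [List.foldl_map]
  rw [hmap]
  set pairs := userdata.map (fun p => (pvName p.2, p.2)) with hpairs
  have hkeys : ((pairs.foldl (fun d q => d.modify q.1 [] (fun l => l ++ [q.2])) PySem.Dict.empty).keys)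
      = PySem.List.dedup (pairs.map Prod.fst) := by
    rw [PySem.Dict.keys_foldl_modify_key pairs Prod.fst [] (fun _ q l => l ++ [q.2]) PySem.Dict.empty,
      PySem.List.dedup_eq_ofList]
    simp [PySem.Dict.keys_empty, PySem.Set.update, PySem.Set.ofList]
  have hnodup : ((pairs.foldl (fun d q => d.modify q.1 [] (fun l => l ++ [q.2])) PySem.Dict.empty).keys).Nodup := by
    exact PySem.Dict.nodup_keys_foldl_modify_key pairs Prod.fst [] (fun _ q l => l ++ [q.2]) PySem.Dict.empty
      (by simp [PySem.Dict.keys_empty])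
  rw [PySem.Dict.items_eq_map_keys _ hnodup [], hkeys]
  refine List.map_congr_left ?_
  intro n _
  rw [PySem.Dict.getD_foldl_modify_append pairs PySem.Dict.empty n]
  simp [PySem.Dict.getD_empty]

-- ===== VERDICT (by name: the statement is the Claim_ definition above) =====
theorem getAllAllianzMember_py_spec : Claim_equal_getAllAllianzMember_py := by
  intro userdata _ _
  unfold Spec_getAllAllianzMember_py
  exact pv_main userdata
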